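-- pv_equiv track=rewrite | github.com/ArchonMegalon/executive-assistant | ea/app/services/ltd_runtime_catalog.py | _table_bounds
-- ===== SOURCE A (Python) =====
-- def _table_bounds(lines: list[str], heading: str) -> tuple[int, int]:
--     try:
--         heading_index = next(index for index, value in enumerate(lines) if value.strip() == heading)
--     except StopIteration as exc:
--         raise ValueError(f"inventory_heading_not_found:{heading}") from exc
--     try:
--         table_start = next(
--             index for index in range(heading_index + 1, len(lines)) if lines[index].strip().startswith("|")
--         )
--     except StopIteration as exc:
--         raise ValueError(f"inventory_table_not_found:{heading}") from exc
--     table_end = table_start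
--     while table_end < len(lines) and lines[table_end].strip().startswith("|"):
--         table_end += 1
--     return table_start, table_end
-- ===== SOURCE B (Python) =====
-- def _table_bounds(lines: list[str], heading: str) -> tuple[int, int]:
--     phase = 0  # 0 = seeking heading, 1 = seeking table, 2 = in table
--     table_start = table_end = -1
--     for i, line in enumerate(lines):
--         s = line.strip()
--         if phase == 0:
--             if s == heading:
--                 phase = 1
--         elif phase == 1:
--             if s.startswith("|"):
--                 table_start = i
--                 table_end = i + 1
--                 phase = 2
--         else:
--             if s.startswith("|"):
--                 table_end = i + 1
--             else:
--                 break
--     if phase == 0: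
--         raise ValueError(f"inventory_heading_not_found:{heading}")
--     if phase == 1:
--         raise ValueError(f"inventory_table_not_found:{heading}")
--     return table_start, table_end
-- ===== Notes on version B (the rewrite author's own statement) =====
-- stated objective: alternative
-- what changed: Replaced A's three separate passes (next over enumerate, next over an index range, and a while loop) with a single left-to-right scan driven by a phase variable (seeking heading / seeking table / in table) that records table_start and extends table_end as it goes.
import Mathlib
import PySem

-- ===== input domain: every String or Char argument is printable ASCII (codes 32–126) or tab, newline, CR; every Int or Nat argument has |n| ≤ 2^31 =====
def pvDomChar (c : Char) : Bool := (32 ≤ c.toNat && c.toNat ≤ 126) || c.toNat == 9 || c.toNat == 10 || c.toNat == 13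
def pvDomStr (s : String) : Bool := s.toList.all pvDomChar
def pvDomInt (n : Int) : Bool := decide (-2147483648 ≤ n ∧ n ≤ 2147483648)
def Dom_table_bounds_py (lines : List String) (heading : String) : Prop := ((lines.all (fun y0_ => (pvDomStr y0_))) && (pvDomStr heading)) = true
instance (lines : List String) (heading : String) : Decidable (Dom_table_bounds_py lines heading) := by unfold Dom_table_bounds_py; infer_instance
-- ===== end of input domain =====

-- B replaces A's three successive passes with a single scan driven by a phase variable; same O(n) cost, different decomposition.
-- Pre_ excludes exactly the inputs on which A raises ValueError (heading absent, or no '|' line after it); B raises there too.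


-- ===== PORT A =====
-- A's first next(): scan enumerate(lines) for the first stripped line equal to heading
def aFindHeading (heading : String) : List String → Nat → Option Nat
  | [], _ => none
  | v :: rest, i =>
    if PySem.Str.strip v == heading then some i else aFindHeading heading rest (i + 1)

-- A's second next(): first index in range(heading_index+1, len(lines)) whose stripped line starts with "|"
def aFindTable (lines : List String) (idx : Nat) : Option Nat :=
  if idx < lines.length then
    if PySem.Str.startswith (PySem.Str.strip (lines.getD idx "")) "|" then some idx
    else aFindTable lines (idx + 1)
  else none
termination_by lines.length - idx
decreasing_by omega

-- A's while loop extending table_end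
def aExtend (lines : List String) (te : Nat) : Nat :=
  if te < lines.length then
    if PySem.Str.startswith (PySem.Str.strip (lines.getD te "")) "|" then aExtend lines (te + 1)
    else te
  else te
termination_by lines.length - te
decreasing_by omega

def table_bounds_py (lines : List String) (heading : String) : Int × Int :=
  match aFindHeading heading lines 0 with
  | none => (0, 0)          -- Python raises ValueError("inventory_heading_not_found:…") here; outside Pre_
  | some hidx =>
    match aFindTable lines (hidx + 1) with
    | none => (0, 0)        -- Python raises ValueError("inventory_table_not_found:…") here; outside Pre_
    | some ts => ((ts : Int), (aExtend lines ts : Int))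

-- ===== PORT B =====
-- B's single for-loop with phase ∈ {0,1,2}; returns the final (phase, table_start, table_end)
def bLoop (heading : String) : List String → Nat → Nat → Int → Int → Nat × Int × Int
  | [], _, phase, ts, te => (phase, ts, te)
  | line :: rest, i, phase, ts, te =>
    let s := PySem.Str.strip line
    if phase == 0 then
      bLoop heading rest (i + 1) (if s == heading then 1 else 0) ts te
    else if phase == 1 then
      if PySem.Str.startswith s "|" then
        bLoop heading rest (i + 1) 2 (i : Int) ((i : Int) + 1)
      else
        bLoop heading rest (i + 1) 1 ts te
    else
      if PySem.Str.startswith s "|" then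
        bLoop heading rest (i + 1) 2 ts ((i : Int) + 1)
      else
        (phase, ts, te)   -- break

def table_bounds_py_alt (lines : List String) (heading : String) : Int × Int :=
  match bLoop heading lines 0 0 (-1) (-1) with
  | (0, _, _) => (0, 0)   -- Python raises ValueError("inventory_heading_not_found:…") here; outside Pre_
  | (1, _, _) => (0, 0)   -- Python raises ValueError("inventory_table_not_found:…") here; outside Pre_
  | (_, ts, te) => (ts, te)

-- ===== PRECONDITION & SPEC =====
-- Pre_ excludes exactly the inputs where A raises ValueError: no line strips to heading, or no later line strips to one starting with "|".
def Pre_table_bounds_py (lines : List String) (heading : String) : Prop :=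
  ∃ i ∈ List.range lines.length, ∃ j ∈ List.range lines.length,
    i < j ∧ PySem.Str.strip (lines.getD i "") = heading ∧
    PySem.Str.startswith (PySem.Str.strip (lines.getD j "")) "|" = true
instance (lines : List String) (heading : String) : Decidable (Pre_table_bounds_py lines heading) := by
  unfold Pre_table_bounds_py; infer_instance

def pvWitness_table_bounds_py : List String × String :=
  (["## Inventory", "text", " | a | b |", "| c | d |", "done"], "## Inventory")

def Spec_table_bounds_py (lines : List String) (heading : String) (out : Int × Int) : Prop := out = table_bounds_py_alt lines heading
instance (lines : List String) (heading : String) (out : Int × Int) : Decidable (Spec_table_bounds_py lines heading out) := by unfold Spec_table_bounds_py; infer_instance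

-- ===== CLAIM (what is proved, stated in full; the proofs are below) =====
def Claim_equal_table_bounds_py : Prop := ∀ (lines : List String) (heading : String), Dom_table_bounds_py lines heading → Pre_table_bounds_py lines heading → Spec_table_bounds_py lines heading (table_bounds_py lines heading)

-- ===== LEMMAS AND PROOFS =====

def predT (v : String) : Bool := PySem.Str.startswith (PySem.Str.strip v) "|"

theorem aFindHeading_eq (heading : String) (l : List String) (i : Nat) :
    aFindHeading heading l i =
      (l.findIdx? (fun v => PySem.Str.strip v == heading)).map (fun k => k + i) := by
  induction l generalizing i with
  | nil => simp [aFindHeading]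
  | cons a rest ih =>
    simp only [aFindHeading, List.findIdx?_cons]
    by_cases h : PySem.Str.strip a == heading
    · simp [h]
    · simp only [h, Bool.false_eq_true, ite_false, ih, Option.map_map]
      cases rest.findIdx? (fun v => PySem.Str.strip v == heading) <;> simp <;> omega

theorem aFindTable_eq (lines : List String) (idx : Nat) :
    aFindTable lines idx = ((lines.drop idx).findIdx? predT).map (fun k => idx + k) := by
  by_cases h : idx < lines.length
  · have hg : lines.getD idx "" = lines[idx] := by
      simp [List.getD_eq_getElem?_getD, List.getElem?_eq_getElem h]
    rw [List.drop_eq_getElem_cons h, List.findIdx?_cons]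
    rw [aFindTable]
    simp only [h, if_pos, hg]
    by_cases hp : predT lines[idx]
    · have hps : PySem.Str.startswith (PySem.Str.strip lines[idx]) "|" = true := hp
      simp only [hps, hp, ite_true]
      simp
    · rw [Bool.not_eq_true] at hp
      have hps : PySem.Str.startswith (PySem.Str.strip lines[idx]) "|" = false := hp
      rw [hps, aFindTable_eq lines (idx + 1)]
      simp only [hp, Bool.false_eq_true, ite_false, Option.map_map]
      cases (lines.drop (idx + 1)).findIdx? predT <;> simp <;> omega
  · rw [aFindTable]
    simp [h, List.drop_eq_nil_of_le (by omega : lines.length ≤ idx)]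
termination_by lines.length - idx
decreasing_by omega

theorem aExtend_eq (lines : List String) (te : Nat) :
    aExtend lines te = te + ((lines.drop te).takeWhile predT).length := by
  by_cases h : te < lines.length
  · have hg : lines.getD te "" = lines[te] := by
      simp [List.getD_eq_getElem?_getD, List.getElem?_eq_getElem h]
    rw [List.drop_eq_getElem_cons h, List.takeWhile_cons]
    rw [aExtend]
    simp only [h, if_pos, hg]
    by_cases hp : predT lines[te]
    · have hps : PySem.Str.startswith (PySem.Str.strip lines[te]) "|" = true := hp
      rw [hps, aExtend_eq lines (te + 1)]
      simp only [hp, ite_true, List.length_cons]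
      omega
    · rw [Bool.not_eq_true] at hp
      have hps : PySem.Str.startswith (PySem.Str.strip lines[te]) "|" = false := hp
      rw [hps]
      simp [hp]
  · rw [aExtend]
    simp [h, List.drop_eq_nil_of_le (by omega : lines.length ≤ te)]
termination_by lines.length - te
decreasing_by omega

theorem bLoop_phase2 (heading : String) (l : List String) (i : Nat) (ts : Int) :
    bLoop heading l i 2 ts (i : Int) =
      (2, ts, (i : Int) + ((l.takeWhile predT).length : Int)) := by
  induction l generalizing i with
  | nil => simp [bLoop]
  | cons a rest ih =>
    simp only [bLoop, List.takeWhile_cons]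
    by_cases hp : predT a
    · have hps : PySem.Str.startswith (PySem.Str.strip a) "|" = true := hp
      have h1 : ((i : Int) + 1) = ((i + 1 : Nat) : Int) := by push_cast; ring
      simp only [hps, hp, ite_true, reduceIte, h1, ih (i + 1)]
      simp only [List.length_cons, Prod.mk.injEq, true_and]
      push_cast
      ring
    · rw [Bool.not_eq_true] at hp
      have hps : PySem.Str.startswith (PySem.Str.strip a) "|" = false := hp
      simp only [reduceIte, hps, hp, Bool.false_eq_true, ite_false]
      simp

theorem bLoop_phase1 (heading : String) (l : List String) (i : Nat) (ts te : Int) :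
    bLoop heading l i 1 ts te =
      match l.findIdx? predT with
      | none => (1, ts, te)
      | some k => (2, ((i + k : Nat) : Int),
          ((i + k : Nat) : Int) + 1 + (((l.drop (k + 1)).takeWhile predT).length : Int)) := by
  induction l generalizing i with
  | nil => simp [bLoop]
  | cons a rest ih =>
    simp only [bLoop, List.findIdx?_cons]
    by_cases hp : predT a
    · have hps : PySem.Str.startswith (PySem.Str.strip a) "|" = true := hp
      have h1 : ((i : Int) + 1) = ((i + 1 : Nat) : Int) := by push_cast; ring
      simp only [hps, hp, ite_true, reduceIte, h1, bLoop_phase2 heading rest (i + 1) (i : Int)]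
      simp <;> push_cast <;> ring
    · rw [Bool.not_eq_true] at hp
      have hps : PySem.Str.startswith (PySem.Str.strip a) "|" = false := hp
      simp only [hps, hp, Bool.false_eq_true, ite_false, reduceIte, ih (i + 1)]
      cases hF : rest.findIdx? predT with
      | none => simp
      | some k =>
        simp only [Option.map_some]
        have h2 : i + 1 + k = i + (k + 1) := by omega
        simp [h2]

theorem bLoop_phase0 (heading : String) (l : List String) (i : Nat) (ts te : Int) :
    bLoop heading l i 0 ts te =
      match l.findIdx? (fun v => PySem.Str.strip v == heading) with
      | none => (0, ts, te)
      | some k => bLoop heading (l.drop (k + 1)) (i + k + 1) 1 ts te := by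
  induction l generalizing i with
  | nil => simp [bLoop]
  | cons a rest ih =>
    simp only [bLoop, List.findIdx?_cons]
    by_cases h : PySem.Str.strip a == heading
    · simp [h]
    · simp only [h, Bool.false_eq_true, ite_false, reduceIte, ih (i + 1)]
      cases hF : rest.findIdx? (fun v => PySem.Str.strip v == heading) with
      | none => simp
      | some k =>
        simp only [Option.map_some]
        have h2 : i + 1 + k + 1 = i + (k + 1) + 1 := by omega
        simp [h2]

theorem findIdx?_drop_head {α : Type} (p : α → Bool) (l : List α) (k : Nat)
    (h : l.findIdx? p = some k) : ∃ a rest, l.drop k = a :: rest ∧ p a = true := by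
  induction l generalizing k with
  | nil => simp [List.findIdx?_nil] at h
  | cons x xs ih =>
    rw [List.findIdx?_cons] at h
    by_cases hp : p x
    · simp [hp] at h
      exact ⟨x, xs, by simp [← h], hp⟩
    · simp [hp] at h
      obtain ⟨k', hk', rfl⟩ := h
      obtain ⟨a, rest, hd, hpa⟩ := ih k' hk'
      exact ⟨a, rest, by simpa using hd, hpa⟩

theorem main_eq (lines : List String) (heading : String) :
    table_bounds_py lines heading = table_bounds_py_alt lines heading := by
  unfold table_bounds_py table_bounds_py_alt
  rw [aFindHeading_eq, bLoop_phase0]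
  cases hH : lines.findIdx? (fun v => PySem.Str.strip v == heading) with
  | none => simp
  | some hidx =>
    simp only [Option.map_some, Nat.add_zero, Nat.zero_add]
    rw [aFindTable_eq, bLoop_phase1]
    cases hT : (lines.drop (hidx + 1)).findIdx? predT with
    | none => simp
    | some k =>
      simp only [Option.map_some]
      obtain ⟨a, rest, hd, hpa⟩ := findIdx?_drop_head predT (lines.drop (hidx + 1)) k hT
      rw [List.drop_drop] at hd
      rw [List.drop_drop]
      rw [aExtend_eq, hd, List.takeWhile_cons, hpa]
      have hdrop : lines.drop (hidx + 1 + (k + 1)) = rest := by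
        have h3 : hidx + 1 + (k + 1) = hidx + 1 + k + 1 := by omega
        rw [h3, ← List.drop_drop, hd]
        simp
      rw [hdrop]
      simp only [ite_true, List.length_cons, Prod.mk.injEq, true_and]
      push_cast
      ring

-- ===== VERDICT (by name: the statement is the Claim_ definition above) =====
theorem table_bounds_py_spec : Claim_equal_table_bounds_py := by
  intro lines heading _ _
  unfold Spec_table_bounds_py
  exact main_eq lines heading
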